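-- pv_equiv track=rewrite | github.com/1801BM1/cpu11 | am4/rom/tools/plm.py | get_x16
-- ===== SOURCE A (Python) =====
-- def get_x16(mset, mclr, x=16):
--     s = ''
--     for i in range(x):
--         if mset & (1 << (x - 1 - i)):
--             if mclr & (1 << (x - 1 - i)):
--                 s += '.'
--             else:
--                 s += '1'
--         elif mclr & (1 << (x - 1 - i)):
--             s += '0'
--         else:
--             s += 'x'
--     return s
-- ===== SOURCE B (Python) =====
-- def _bits(n):
--     # binary digits of a nonnegative int, most significant first; '' for 0
--     s = ''
--     while n:
--         s = str(n % 2) + s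
--         n //= 2
--     return s
--
-- _TABLE = {('1', '1'): '.', ('1', '0'): '1', ('0', '1'): '0', ('0', '0'): 'x'}
--
-- def get_x16(mset, mclr, x=16):
--     # Render both masked words as zero-padded binary strings, then combine
--     # them character-wise through a pair table.
--     if x <= 0:
--         return ''
--     mask = (1 << x) - 1
--     bs = _bits(mset & mask).rjust(x, '0')
--     bc = _bits(mclr & mask).rjust(x, '0')
--     return ''.join(_TABLE[p] for p in zip(bs, bc))
-- ===== Notes on version B (the rewrite author's own statement) =====
-- stated objective: alternative
-- what changed: Instead of testing each bit position MSB-first with a freshly shifted x-bit mask inside one loop, B works in staged passes: it renders each masked word as a binary string by an iterative divmod conversion padded with rjust, then zips the two strings and maps each character pair through a lookup table.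
import Mathlib
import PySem

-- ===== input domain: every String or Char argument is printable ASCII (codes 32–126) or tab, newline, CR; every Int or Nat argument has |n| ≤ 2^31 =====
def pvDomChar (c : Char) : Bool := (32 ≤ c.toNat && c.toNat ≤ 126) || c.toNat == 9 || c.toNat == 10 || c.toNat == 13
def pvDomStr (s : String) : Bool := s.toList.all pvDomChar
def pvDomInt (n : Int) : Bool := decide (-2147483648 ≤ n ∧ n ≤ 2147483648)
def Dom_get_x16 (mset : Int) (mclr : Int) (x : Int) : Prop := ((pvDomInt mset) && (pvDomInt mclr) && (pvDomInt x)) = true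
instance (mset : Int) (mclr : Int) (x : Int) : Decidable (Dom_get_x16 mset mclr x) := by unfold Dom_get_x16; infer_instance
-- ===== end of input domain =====

-- B replaces A's per-position mask tests with staged passes: render both masked
-- words as zero-padded binary strings by value recursion, then combine the two
-- strings character-wise through a pair table (objective: alternative).

-- ===== PORT A =====
def get_x16 (mset : Int) (mclr : Int) (x : Int) : String :=
  String.ofList ((PySem.List.pyRange 0 x 1).foldl (fun s i =>
    if PySem.Int.band mset ((1 : Int) <<< (x - 1 - i)) ≠ 0 then
      (if PySem.Int.band mclr ((1 : Int) <<< (x - 1 - i)) ≠ 0 then s ++ ['.'] else s ++ ['1'])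
    else if PySem.Int.band mclr ((1 : Int) <<< (x - 1 - i)) ≠ 0 then s ++ ['0']
    else s ++ ['x']) [])

-- ===== PORT B =====
-- Source B's _bits loop: while n: s = str(n % 2) + s; n //= 2
-- (the Python value is nonnegative where called, so the loop lives on Nat)
def pvBitsLoop : Nat → List Char → List Char
  | 0, s => s
  | n+1, s => pvBitsLoop ((n+1)/2) ((if (n+1) % 2 = 1 then '1' else '0') :: s)
decreasing_by exact Nat.div_lt_self (Nat.succ_pos n) one_lt_two

-- Source B's _bits: binary digits of a nonnegative int, most significant first; [] for 0
def pvBits (n : Nat) : List Char := pvBitsLoop n []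

-- Source B's .rjust(x, '0')
def pvRjust (s : List Char) (w : Nat) : List Char := List.replicate (w - s.length) '0' ++ s

-- Source B's _TABLE
def pvTable : PySem.Dict (Char × Char) Char :=
  PySem.Dict.ofList [(('1','1'),'.'), (('1','0'),'1'), (('0','1'),'0'), (('0','0'),'x')]

def get_x16_alt (mset : Int) (mclr : Int) (x : Int) : String :=
  if x ≤ 0 then "" else
    let mask : Int := (1 : Int) <<< x - 1
    let bs := pvRjust (pvBits (PySem.Int.band mset mask).toNat) x.toNat
    let bc := pvRjust (pvBits (PySem.Int.band mclr mask).toNat) x.toNat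
    String.ofList ((bs.zip bc).map (fun p => PySem.Dict.getD pvTable p 'x'))

-- ===== PRECONDITION & SPEC =====
def Spec_get_x16 (mset : Int) (mclr : Int) (x : Int) (out : String) : Prop := out = get_x16_alt mset mclr x
instance (mset : Int) (mclr : Int) (x : Int) (out : String) : Decidable (Spec_get_x16 mset mclr x out) := by unfold Spec_get_x16; infer_instance

-- ===== CLAIM (what is proved, stated in full; the proofs are below) =====
def Claim_equal_get_x16 : Prop := ∀ (mset : Int) (mclr : Int) (x : Int), Dom_get_x16 mset mclr x → Spec_get_x16 mset mclr x (get_x16 mset mclr x)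

-- ===== LEMMAS AND PROOFS =====

-- the character A emits when looking at bit position j
def pvCharA (mset mclr : Int) (j : Int) : Char :=
  if PySem.Int.band mset ((1 : Int) <<< j) ≠ 0 then
    (if PySem.Int.band mclr ((1 : Int) <<< j) ≠ 0 then '.' else '1')
  else if PySem.Int.band mclr ((1 : Int) <<< j) ≠ 0 then '0' else 'x'

-- the character for a (set-bit, clear-bit) pair
def pvPair (s c : Bool) : Char :=
  if s then (if c then '.' else '1') else (if c then '0' else 'x')

-- the binary digit B's padded string has at bit position j
def pvBitChar (a j : Nat) : Char := if a.testBit j then '1' else '0'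

lemma pv_shl_one (k : Nat) : (1 : Int) <<< (k : Int) = ((2 ^ k : Nat) : Int) := by
  rw [show ((1:Int)) = ((1:Nat):Int) from rfl, Int.shiftLeft_natCast]
  norm_num [Nat.shiftLeft_eq]

-- subtracting from the all-ones word flips every low bit
lemma pv_comp_testBit : ∀ (j n b : Nat), j < n → b < 2 ^ n →
    ((2 ^ n - 1) - b).testBit j = ! b.testBit j := by
  intro j
  induction j with
  | zero =>
    intro n b hj hb
    obtain ⟨m, rfl⟩ : ∃ m, n = m + 1 := ⟨n - 1, by omega⟩
    rw [pow_succ] at hb ⊢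
    simp only [Nat.testBit_zero, ← decide_not, decide_eq_decide]
    omega
  | succ j ih =>
    intro n b hj hb
    obtain ⟨m, rfl⟩ : ∃ m, n = m + 1 := ⟨n - 1, by omega⟩
    rw [Nat.testBit_add_one, Nat.testBit_add_one]
    have hp : 2 ^ (m + 1) = 2 * 2 ^ m := by rw [pow_succ]; ring
    have hdiv : ((2 ^ (m + 1) - 1) - b) / 2 = (2 ^ m - 1) - b / 2 := by omega
    rw [hdiv]
    exact ih m (b / 2) (by omega) (by omega)

lemma pv_mask_cast (n : Nat) : (1 : Int) <<< ((n : Nat) : Int) - 1 = ((2 ^ n - 1 : Nat) : Int) := by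
  rw [pv_shl_one]
  have : (1:Nat) ≤ 2 ^ n := Nat.one_le_two_pow
  push_cast [this]
  ring

-- the masked word fits in n bits
lemma pv_band_mask_lt (m : Int) (n : Nat) :
    (PySem.Int.band m ((1 : Int) <<< ((n : Nat) : Int) - 1)).toNat < 2 ^ n := by
  rw [pv_mask_cast]
  by_cases hm : 0 ≤ m
  · rw [PySem.Int.band_of_nonneg hm (by positivity)]
    simp only [Int.toNat_natCast]
    rw [Nat.and_two_pow_sub_one_eq_mod]
    exact Nat.mod_lt _ (by positivity)
  · simp only [PySem.Int.band, if_neg hm,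
      if_pos (show (0:Int) ≤ ((2^n - 1 : Nat) : Int) by positivity), Int.toNat_natCast]
    have h1 : (1:Nat) ≤ 2 ^ n := Nat.one_le_two_pow
    exact lt_of_le_of_lt (Nat.sub_le _ _) (by omega)

-- core: A's per-position test reads exactly bit j of the masked word
lemma pv_band_testBit (m : Int) (n j : Nat) (hj : j < n) :
    (PySem.Int.band m ((1 : Int) <<< ((j : Nat) : Int)) ≠ 0) ↔
      (PySem.Int.band m ((1 : Int) <<< ((n : Nat) : Int) - 1)).toNat.testBit j := by
  rw [pv_shl_one, pv_mask_cast]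
  by_cases hm : 0 ≤ m
  · rw [PySem.Int.band_of_nonneg hm (by positivity),
      PySem.Int.band_of_nonneg hm (by positivity)]
    simp only [Int.toNat_natCast]
    rw [Nat.and_two_pow, Nat.and_two_pow_sub_one_eq_mod]
    rw [Nat.testBit_mod_two_pow]
    cases h : m.toNat.testBit j
    · simp
    · simp [hj]
  · simp only [PySem.Int.band, if_neg hm,
      if_pos (show (0:Int) ≤ ((2^j : Nat) : Int) by positivity),
      if_pos (show (0:Int) ≤ ((2^n - 1 : Nat) : Int) by positivity)]
    simp only [Int.toNat_natCast]
    rw [Nat.two_pow_and]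
    rw [Nat.land_comm, Nat.and_two_pow_sub_one_eq_mod]
    have hlt : (-m - 1).toNat % 2 ^ n < 2 ^ n := Nat.mod_lt _ (by positivity)
    rw [pv_comp_testBit j n _ hj hlt, Nat.testBit_mod_two_pow]
    cases h : (-m - 1).toNat.testBit j
    · simp
    · simp [hj]

-- A's fold is a map over bit positions, MSB first
lemma pv_A_chars (mset mclr x : Int) :
    ((PySem.List.pyRange 0 x 1).foldl (fun s i =>
      if PySem.Int.band mset ((1 : Int) <<< (x - 1 - i)) ≠ 0 then
        (if PySem.Int.band mclr ((1 : Int) <<< (x - 1 - i)) ≠ 0 then s ++ ['.'] else s ++ ['1'])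
      else if PySem.Int.band mclr ((1 : Int) <<< (x - 1 - i)) ≠ 0 then s ++ ['0']
      else s ++ ['x']) []) =
      (List.range x.toNat).map (fun (k : Nat) => pvCharA mset mclr (x - 1 - (k : Int))) := by
  rw [PySem.List.pyRange_one, List.foldl_map]
  have hfun : (fun (s : List Char) (k : Nat) =>
      (fun s i =>
        if PySem.Int.band mset ((1 : Int) <<< (x - 1 - i)) ≠ 0 then
          (if PySem.Int.band mclr ((1 : Int) <<< (x - 1 - i)) ≠ 0 then s ++ ['.'] else s ++ ['1'])
        else if PySem.Int.band mclr ((1 : Int) <<< (x - 1 - i)) ≠ 0 then s ++ ['0']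
        else s ++ ['x']) s (0 + (k : Int))) =
      (fun (s : List Char) (k : Nat) => s ++ [pvCharA mset mclr (x - 1 - ((0:Int) + (k : Int)))]) := by
    funext s k
    simp only [pvCharA]
    split_ifs <;> rfl
  rw [hfun, PySem.List.foldl_append_singleton_eq_map]
  simp only [List.nil_append, zero_add, sub_zero]

-- proof-side recursive form of the binary rendering
def pvBitsRec : Nat → List Char
  | 0 => []
  | n+1 => pvBitsRec ((n+1)/2) ++ [if (n+1) % 2 = 1 then '1' else '0']
decreasing_by exact Nat.div_lt_self (Nat.succ_pos n) one_lt_two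

lemma pv_bitsLoop_eq : ∀ (n : Nat) (s : List Char), pvBitsLoop n s = pvBitsRec n ++ s := by
  intro n
  induction n using pvBitsRec.induct with
  | case1 => intro s; simp [pvBitsLoop, pvBitsRec]
  | case2 n ih =>
    intro s
    rw [pvBitsLoop, pvBitsRec, ih, List.append_assoc]
    rfl

lemma pv_bits_eq (n : Nat) : pvBits n = pvBitsRec n := by
  rw [pvBits, pv_bitsLoop_eq, List.append_nil]

-- one step of padded binary rendering peels off the LAST (lowest) bit
lemma pv_pad_step (a x : Nat) :
    pvRjust (pvBitsRec a) (x+1) =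
      pvRjust (pvBitsRec (a/2)) x ++ [if a % 2 = 1 then '1' else '0'] := by
  cases a with
  | zero => simp [pvBitsRec, pvRjust, List.replicate_succ']
  | succ n =>
    rw [pvBitsRec]
    simp only [pvRjust, List.length_append, List.length_cons, List.length_nil]
    have h : x + 1 - ((pvBitsRec ((n+1)/2)).length + (0 + 1)) = x - (pvBitsRec ((n+1)/2)).length := by
      omega
    rw [h, ← List.append_assoc]

-- the padded binary string lists the bits of a, MSB first
lemma pv_pad (x : Nat) : ∀ a, a < 2 ^ x →
    pvRjust (pvBitsRec a) x = (List.range x).map (fun i => pvBitChar a (x - 1 - i)) := by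
  induction x with
  | zero =>
    intro a ha
    have : a = 0 := by omega
    subst this
    simp [pvBitsRec, pvRjust]
  | succ x ih =>
    intro a ha
    have hp : 2 ^ (x + 1) = 2 * 2 ^ x := by rw [pow_succ]; ring
    rw [pv_pad_step, ih (a/2) (by omega)]
    rw [List.range_succ, List.map_append]
    congr 1
    · refine List.map_congr_left ?_
      intro i hi
      rw [List.mem_range] at hi
      simp only [pvBitChar]
      have hx : x + 1 - 1 - i = (x - 1 - i) + 1 := by omega
      rw [hx, Nat.testBit_add_one]
    · simp [pvBitChar, Nat.testBit_zero]

-- B's table lookup on two rendered digits is the pair character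
lemma pv_table_pair (s c : Bool) :
    PySem.Dict.getD pvTable ((if s then '1' else '0'), (if c then '1' else '0')) 'x' =
      pvPair s c := by
  cases s <;> cases c <;> decide

-- ===== VERDICT (by name: the statement is the Claim_ definition above) =====
theorem get_x16_spec : Claim_equal_get_x16 := by
  intro mset mclr x _
  show get_x16 mset mclr x = get_x16_alt mset mclr x
  by_cases hx : x ≤ 0
  · rw [get_x16, get_x16_alt, if_pos hx, PySem.List.pyRange_one_eq_nil hx]
    rfl
  · obtain ⟨n, rfl⟩ : ∃ n : Nat, x = (n : Int) := ⟨x.toNat, by omega⟩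
    have hpos : ¬ ((n : Int) ≤ 0) := hx
    rw [get_x16, get_x16_alt]
    simp only [hpos, if_false, Int.toNat_natCast]
    rw [pv_A_chars]
    rw [pv_bits_eq, pv_bits_eq]
    rw [pv_pad n _ (pv_band_mask_lt mset n), pv_pad n _ (pv_band_mask_lt mclr n),
      List.zip_map', List.map_map, Int.toNat_natCast]
    refine congrArg String.ofList ?_
    refine List.map_congr_left ?_
    intro k hk
    rw [List.mem_range] at hk
    have hcast : (n : Int) - 1 - (k : Int) = ((n - 1 - k : Nat) : Int) := by omega
    rw [hcast]
    have hlt : n - 1 - k < n := by omega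
    simp only [Function.comp, pvBitChar]
    rw [pv_table_pair]
    -- pointwise: A's character equals the pair character of the two masked bits
    have h1 := pv_band_testBit mset n (n - 1 - k) hlt
    have h2 := pv_band_testBit mclr n (n - 1 - k) hlt
    by_cases c1 : PySem.Int.band mset ((1 : Int) <<< ((n - 1 - k : Nat) : Int)) ≠ 0 <;>
      by_cases c2 : PySem.Int.band mclr ((1 : Int) <<< ((n - 1 - k : Nat) : Int)) ≠ 0
    · have b1 : (PySem.Int.band mset ((1 : Int) <<< ((n:Nat) : Int) - 1)).toNat.testBit (n-1-k) = true := h1.mp c1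
      have b2 : (PySem.Int.band mclr ((1 : Int) <<< ((n:Nat) : Int) - 1)).toNat.testBit (n-1-k) = true := h2.mp c2
      simp [pvCharA, pvPair, c1, c2, b1, b2]
    · have b1 : (PySem.Int.band mset ((1 : Int) <<< ((n:Nat) : Int) - 1)).toNat.testBit (n-1-k) = true := h1.mp c1
      have b2 : (PySem.Int.band mclr ((1 : Int) <<< ((n:Nat) : Int) - 1)).toNat.testBit (n-1-k) = false := by
        cases hb : (PySem.Int.band mclr ((1 : Int) <<< ((n:Nat) : Int) - 1)).toNat.testBit (n-1-k)
        · rfl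
        · exact absurd (h2.mpr hb) c2
      simp [pvCharA, pvPair, c1, c2, b1, b2]
    · have b1 : (PySem.Int.band mset ((1 : Int) <<< ((n:Nat) : Int) - 1)).toNat.testBit (n-1-k) = false := by
        cases hb : (PySem.Int.band mset ((1 : Int) <<< ((n:Nat) : Int) - 1)).toNat.testBit (n-1-k)
        · rfl
        · exact absurd (h1.mpr hb) c1
      have b2 : (PySem.Int.band mclr ((1 : Int) <<< ((n:Nat) : Int) - 1)).toNat.testBit (n-1-k) = true := h2.mp c2
      simp [pvCharA, pvPair, c1, c2, b1, b2]
    · have b1 : (PySem.Int.band mset ((1 : Int) <<< ((n:Nat) : Int) - 1)).toNat.testBit (n-1-k) = false := by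
        cases hb : (PySem.Int.band mset ((1 : Int) <<< ((n:Nat) : Int) - 1)).toNat.testBit (n-1-k)
        · rfl
        · exact absurd (h1.mpr hb) c1
      have b2 : (PySem.Int.band mclr ((1 : Int) <<< ((n:Nat) : Int) - 1)).toNat.testBit (n-1-k) = false := by
        cases hb : (PySem.Int.band mclr ((1 : Int) <<< ((n:Nat) : Int) - 1)).toNat.testBit (n-1-k)
        · rfl
        · exact absurd (h2.mpr hb) c2
      simp [pvCharA, pvPair, c1, c2, b1, b2]
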